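-- pv_equiv track=rewrite | github.com/MariaFFA/Lista_Algoritimos | Lista 1/Loucos por balsas.py | separar_informacoes
-- ===== SOURCE A (Python) =====
-- def separar_informacoes(informacoes):
--     primeiro = ''
--     segundo = ''
--     espaco = False
--     for i in informacoes:
--         if i == ' ':
--             espaco = True
--         elif not espaco:
--             primeiro += i
--         else:
--             segundo += i
--     return primeiro, segundo
-- ===== SOURCE B (Python) =====
-- def separar_informacoes(informacoes):
--     idx = informacoes.find(' ')
--     if idx == -1:
--         return informacoes, ''
--     return informacoes[:idx], ''.join(c for c in informacoes[idx + 1:] if c != ' ')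
-- ===== Notes on version B (the rewrite author's own statement) =====
-- stated objective: simpler
-- what changed: Replaces the stateful per-character loop with an espaco flag by locating the first space with str.find, slicing out the prefix, and filtering spaces from the suffix.
import Mathlib
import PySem

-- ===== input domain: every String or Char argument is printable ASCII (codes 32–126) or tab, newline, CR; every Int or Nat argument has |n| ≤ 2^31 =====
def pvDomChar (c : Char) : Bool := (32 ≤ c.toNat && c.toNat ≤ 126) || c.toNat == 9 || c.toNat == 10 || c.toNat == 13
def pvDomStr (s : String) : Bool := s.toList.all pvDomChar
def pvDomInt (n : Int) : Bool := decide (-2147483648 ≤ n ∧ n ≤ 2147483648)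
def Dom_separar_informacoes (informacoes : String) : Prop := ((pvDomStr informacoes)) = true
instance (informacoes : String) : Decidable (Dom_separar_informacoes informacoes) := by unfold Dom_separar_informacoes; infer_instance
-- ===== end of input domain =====

-- B replaces A's stateful per-character loop (espaco flag) by find-first-space, slice the prefix, filter spaces out of the suffix; objective: simpler.


-- ===== PORT A =====
-- A's for-loop over the characters, with the two accumulated strings kept as char lists
-- (s += c is accumulation at the right end) and the espaco flag.
def sepLoop : List Char → List Char × List Char × Bool → List Char × List Char × Bool
  | [], st => st
  | c :: rest, (p, s, esp) =>
      sepLoop rest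
        (if c = ' ' then (p, s, true)
         else if esp = false then (p ++ [c], s, esp)
         else (p, s ++ [c], esp))

def separar_informacoes (informacoes : String) : String × String :=
  let r := sepLoop informacoes.toList ([], [], false)
  (String.ofList r.1, String.ofList r.2.1)

-- ===== PORT B =====
def separar_informacoes_alt (informacoes : String) : String × String :=
  let idx := PySem.Str.find informacoes " "
  if idx = -1 then (informacoes, "")
  else (PySem.Str.slice informacoes none (some idx),
        String.ofList (((PySem.Str.slice informacoes (some (idx + 1)) none).toList).filter (fun c => c != ' ')))

-- ===== PRECONDITION & SPEC =====
def Spec_separar_informacoes (informacoes : String) (out : String × String) : Prop := out = separar_informacoes_alt informacoes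
instance (informacoes : String) (out : String × String) : Decidable (Spec_separar_informacoes informacoes out) := by unfold Spec_separar_informacoes; infer_instance

-- ===== CLAIM (what is proved, stated in full; the proofs are below) =====
def Claim_equal_separar_informacoes : Prop := ∀ (informacoes : String), Dom_separar_informacoes informacoes → Spec_separar_informacoes informacoes (separar_informacoes informacoes)

-- ===== LEMMAS AND PROOFS =====

-- Once espaco is true, only segundo grows, with the non-space characters.
theorem sepLoop_true (cs : List Char) (p s : List Char) :
    sepLoop cs (p, s, true) = (p, s ++ cs.filter (fun c => c != ' '), true) := by
  induction cs generalizing s with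
  | nil => simp [sepLoop]
  | cons c rest ih =>
      by_cases hc : c = ' '
      · simp [sepLoop, hc, ih]
      · simp [sepLoop, hc, ih]

-- Starting with espaco = false: primeiro gets the chars before the first space,
-- segundo the non-space chars after it.
theorem sepLoop_false (cs : List Char) (p s : List Char) :
    sepLoop cs (p, s, false) =
      (p ++ cs.takeWhile (fun c => c != ' '),
       s ++ ((cs.dropWhile (fun c => c != ' ')).tail.filter (fun c => c != ' ')),
       cs.contains ' ') := by
  induction cs generalizing p with
  | nil => simp [sepLoop]
  | cons c rest ih =>
      by_cases hc : c = ' '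
      · simp [sepLoop, hc, sepLoop_true]
      · simp [sepLoop, hc, ih, List.append_assoc]
        exact fun h => absurd h.symm hc

theorem singleton_infix_iff {c : Char} {cs : List Char} : [c] <:+: cs ↔ c ∈ cs := by
  constructor
  · intro h
    exact h.mem (by simp)
  · intro h
    obtain ⟨t1, t2, rfl⟩ := List.append_of_mem h
    exact ⟨t1, t2, by simp⟩

-- take/drop at the first occurrence of ' ' agree with takeWhile/dropWhile.
theorem take_drop_first (cs : List Char) (n : Nat)
    (h1 : cs[n]? = some ' ') (h2 : ∀ i, i < n → cs[i]? ≠ some ' ') :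
    cs.take n = cs.takeWhile (fun c => c != ' ') ∧
    cs.drop (n + 1) = (cs.dropWhile (fun c => c != ' ')).tail := by
  induction cs generalizing n with
  | nil => simp at h1
  | cons c rest ih =>
      cases n with
      | zero =>
          simp at h1
          subst h1
          simp
      | succ m =>
          have hc : c ≠ ' ' := by
            intro h; exact h2 0 (Nat.succ_pos m) (by simp [h])
          simp only [List.getElem?_cons_succ] at h1
          have h2' : ∀ i, i < m → rest[i]? ≠ some ' ' := by
            intro i hi
            have := h2 (i + 1) (by omega)
            simpa using this
          obtain ⟨ht, hd⟩ := ih m h1 h2'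
          constructor
          · simp [hc, ht]
          · simp [hc, hd]

-- ===== VERDICT (by name: the statement is the Claim_ definition above) =====
theorem separar_informacoes_spec : Claim_equal_separar_informacoes := by
  intro informacoes _
  unfold Spec_separar_informacoes separar_informacoes separar_informacoes_alt
  set cs := informacoes.toList with hcs
  by_cases h : PySem.Str.find informacoes " " = -1
  · -- no space in the string
    have hnot : ' ' ∉ cs := by
      have := (PySem.Str.find_eq_neg_one_iff informacoes " ").mp h
      simpa [singleton_infix_iff, hcs] using this
    have hdw : cs.dropWhile (fun c => c != ' ') = [] := by
      rw [List.dropWhile_eq_nil_iff]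
      intro x hx
      simp [show x ≠ ' ' from fun hx' => hnot (hx' ▸ hx)]
    have htw : cs.takeWhile (fun c => c != ' ') = cs := by
      rw [List.takeWhile_eq_self_iff]
      intro x hx
      simp [show x ≠ ' ' from fun hx' => hnot (hx' ▸ hx)]
    simp only [hcs] at htw hdw
    simp only [sepLoop_false, hcs]
    rw [if_pos h, htw, hdw]
    simp
  · -- first space at index (find).toNat
    have hfind : PySem.Str.find informacoes " " = PySem.Chars.find cs [' '] := by
      simp [hcs]
    have hnonneg : 0 ≤ PySem.Chars.find cs [' '] := by
      rcases lt_or_ge (PySem.Chars.find cs [' ']) 0 with hlt | hge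
      · exfalso
        have : PySem.Chars.find cs [' '] = -1 := by
          have := PySem.Chars.neg_one_le_find cs [' ']
          omega
        exact h (by rw [hfind, this])
      · exact hge
    obtain ⟨hpre, hmin⟩ := PySem.Chars.find_spec hnonneg
    set n := (PySem.Chars.find cs [' ']).toNat with hn
    have h1 : cs[n]? = some ' ' := by
      obtain ⟨t, ht⟩ := hpre
      have : (cs.drop n)[0]? = some ' ' := by rw [← ht]; simp
      simpa [List.getElem?_drop] using this
    have h2 : ∀ i, i < n → cs[i]? ≠ some ' ' := by
      intro i hi hget
      apply hmin i hi
      have hlt : i < cs.length := by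
        by_contra hge
        simp [List.getElem?_eq_none (by omega : cs.length ≤ i)] at hget
      refine ⟨(cs.drop i).tail, ?_⟩
      rcases hd : cs.drop i with _ | ⟨x, xs⟩
      · have : cs.length ≤ i := by
          have := List.drop_eq_nil_iff.mp hd; omega
        omega
      · have hx : x = ' ' := by
          have h0 : (cs.drop i)[0]? = some ' ' := by
            simpa [List.getElem?_drop] using hget
          rw [hd] at h0; simpa using h0
        simp [hx]
    obtain ⟨htake, hdrop⟩ := take_drop_first cs n h1 h2
    have hmem : ' ' ∈ cs := by
      have hlt : n < cs.length := by
        by_contra hge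
        simp [List.getElem?_eq_none (by omega : cs.length ≤ n)] at h1
      exact List.mem_of_getElem? h1
    have hidx1 : (0:Int) ≤ PySem.Chars.find cs [' '] + 1 := by omega
    have hton : (PySem.Chars.find cs [' '] + 1).toNat = n + 1 := by omega
    have e1 : PySem.Str.slice informacoes none (some (PySem.Str.find informacoes " "))
        = String.ofList (cs.takeWhile (fun c => c != ' ')) := by
      apply String.toList_inj.mp
      rw [PySem.Str.toList_slice, PySem.Chars.slice_eq_listSlice, hfind,
          PySem.List.slice_to _ hnonneg, ← hcs, ← hn, htake]
      simp
    have e2 : (PySem.Str.slice informacoes (some (PySem.Str.find informacoes " " + 1)) none).toList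
        = cs.drop (n + 1) := by
      rw [PySem.Str.toList_slice, PySem.Chars.slice_eq_listSlice, hfind,
          PySem.List.slice_from _ hidx1, ← hcs, hton]
    simp only [sepLoop_false]
    rw [if_neg h, e1, ← hdrop, e2]
    simp
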